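-- pv_equiv track=rewrite | github.com/dhruvi0308/Python | hw6pr2.py | count_faces
-- ===== SOURCE A (Python) =====
-- def count_faces(hand):
--     """Count the occurrences of each face in the hand."""
--     face_count = {}
--     for card in hand:
--         face = card[0]
--         if face in face_count:
--             face_count[face] += 1
--         else:
--             face_count[face] = 1
--     return face_count
-- ===== SOURCE B (Python) =====
-- def count_faces(hand):
--     """Count the occurrences of each face in the hand."""
--     faces = [card[0] for card in hand]
--     return {f: faces.count(f) for f in dict.fromkeys(faces)}
-- ===== Notes on version B (the rewrite author's own statement) =====
-- stated objective: alternative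
-- what changed: B replaces A's single accumulating dict pass (membership test + increment per card) with a two-phase strategy: project out the face list, dedupe it in first-occurrence order via dict.fromkeys, then count each distinct face with list.count.
import Mathlib
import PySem

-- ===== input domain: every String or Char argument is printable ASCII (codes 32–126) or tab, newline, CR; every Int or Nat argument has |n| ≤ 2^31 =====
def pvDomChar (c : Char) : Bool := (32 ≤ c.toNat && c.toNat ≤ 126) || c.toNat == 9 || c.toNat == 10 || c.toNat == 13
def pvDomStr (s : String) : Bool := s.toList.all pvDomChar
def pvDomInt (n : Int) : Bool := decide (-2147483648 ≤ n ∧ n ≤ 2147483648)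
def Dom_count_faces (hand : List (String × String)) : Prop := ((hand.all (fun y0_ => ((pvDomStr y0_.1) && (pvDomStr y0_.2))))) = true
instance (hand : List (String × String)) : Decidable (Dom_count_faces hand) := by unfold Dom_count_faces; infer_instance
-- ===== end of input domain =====

-- ===== PORT A =====
-- literal port of A: one pass building face_count, 'if face in face_count' branch kept
def count_faces (hand : List (String × String)) : List (String × Int) :=
  (hand.foldl (fun face_count card =>
    if PySem.Dict.contains face_count card.1 then
      face_count.insert card.1 (face_count.getD card.1 0 + 1)
    else
      face_count.insert card.1 1) PySem.Dict.empty).items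

-- ===== PORT B =====
-- port of B: project faces, dedup (dict.fromkeys) in first-occurrence order, count each
def count_faces_alt (hand : List (String × String)) : List (String × Int) :=
  let faces := hand.map (·.1)
  (PySem.List.dedup faces).map (fun f => (f, (faces.count f : Int)))

-- ===== PRECONDITION & SPEC =====
def Spec_count_faces (hand : List (String × String)) (out : List (String × Int)) : Prop := out = count_faces_alt hand
instance (hand : List (String × String)) (out : List (String × Int)) : Decidable (Spec_count_faces hand out) := by unfold Spec_count_faces; infer_instance

-- ===== CLAIM (what is proved, stated in full; the proofs are below) =====
def Claim_equal_count_faces : Prop := ∀ (hand : List (String × String)), Dom_count_faces hand → Spec_count_faces hand (count_faces hand)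

-- ===== LEMMAS AND PROOFS =====

-- ===== VERDICT (by name: the statement is the Claim_ definition above) =====
theorem count_faces_spec : Claim_equal_count_faces := by
  intro hand _
  show count_faces hand = count_faces_alt hand
  unfold count_faces count_faces_alt
  have hstep : hand.foldl (fun face_count card =>
      if PySem.Dict.contains face_count card.1 then
        face_count.insert card.1 (face_count.getD card.1 0 + 1)
      else
        face_count.insert card.1 1) (PySem.Dict.empty : PySem.Dict String Int)
      = (hand.map (·.1)).foldl (fun d x => d.insert x (d.getD x 0 + 1)) (PySem.Dict.empty : PySem.Dict String Int) := by
    rw [List.foldl_map]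
    apply PySem.List.foldl_congr_mem
    intro d c _
    by_cases h : PySem.Dict.contains d c.1
    · simp [h]
    · have h0 : d.getD c.1 0 = 0 := PySem.Dict.getD_of_not_contains d 0 (by simpa using h)
      simp [h, h0]
  rw [hstep, PySem.Dict.foldl_insert_getD_add_one_eq_counter, PySem.Dict.items_counter]
  simp [PySem.List.dedup_eq_ofList]
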